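-- pv_equiv track=rewrite | github.com/quanyeomans/agentic-context-mesh | kairix/reflib/resolve.py | _pick_canonical
-- ===== SOURCE A (Python) =====
-- from collections import defaultdict
--
-- def _pick_canonical(names: list[str]) -> str:
--     """Pick the best canonical name from a list of candidates.
--
--     Prefers: longest non-acronym name, then most common.
--     """
--     if not names:
--         return ""
--     # Count occurrences
--     counts: dict[str, int] = defaultdict(int)
--     for n in names:
--         counts[n] += 1
--
--     # Sort by: not-all-upper first (prefer expanded names), then longest, then most frequent
--     candidates = sorted(
--         counts.keys(),
--         key=lambda n: (not n.isupper(), len(n), counts[n]),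
--         reverse=True,
--     )
--     return candidates[0]
-- ===== SOURCE B (Python) =====
-- from collections import Counter
--
--
-- def _pick_canonical(names: list[str]) -> str:
--     """Pick the best canonical name from a list of candidates.
--
--     Prefers: longest non-acronym name, then most common.
--     """
--     if not names:
--         return ""
--     counts = Counter(names)
--     best = ""
--     best_key = None
--     for n, c in counts.items():
--         k = (not n.isupper(), len(n), c)
--         if best_key is None or k > best_key:
--             best, best_key = n, k
--     return best
-- ===== Notes on version B (the rewrite author's own statement) =====
-- stated objective: faster
-- what changed: Replaces A's stable reverse sort of the distinct names by a Counter plus one explicit running-best scan over counts.items() that keeps (best, best_key) and compares the composite key (not isupper, len, count) by hand, so the full ordering of the candidates is never built.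
import Mathlib
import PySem

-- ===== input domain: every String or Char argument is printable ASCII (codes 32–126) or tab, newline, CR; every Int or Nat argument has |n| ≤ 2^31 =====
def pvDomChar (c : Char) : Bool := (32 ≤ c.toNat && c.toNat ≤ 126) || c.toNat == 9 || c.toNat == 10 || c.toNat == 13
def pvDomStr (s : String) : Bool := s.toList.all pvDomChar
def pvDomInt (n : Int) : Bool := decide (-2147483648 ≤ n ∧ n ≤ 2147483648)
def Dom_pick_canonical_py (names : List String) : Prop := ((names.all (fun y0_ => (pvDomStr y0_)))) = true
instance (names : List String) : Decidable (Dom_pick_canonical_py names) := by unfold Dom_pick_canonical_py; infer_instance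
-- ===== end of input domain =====

-- B replaces A's stable reverse sort of the distinct names by a Counter plus one explicit
-- running-best scan over counts.items() with a hand-written lexicographic key comparison.

-- ===== PORT A =====
-- s.isupper() ported by hand (no Str-level isupper in PySem): on the ASCII domain the
-- cased characters are exactly the letters, so s.isupper() ⟺ s has a cased character
-- and none of its cased characters is lowercase — exact on the stated ASCII domain.
def pyStrIsupper (s : String) : Bool :=
  s.toList.any PySem.Chars.isalpha && s.toList.all (fun c => !PySem.Chars.islower c)

-- Python's tuple key (not n.isupper(), len(n), counts[n]) compared lexicographically:
-- encoded as a length-3 List Int (bools as 0/1, as Python compares them), whose '<'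
-- is exactly Python's lexicographic tuple comparison on same-length tuples.
def pyKeyA (counts : PySem.Dict String Int) (n : String) : List Int :=
  [if pyStrIsupper n then 0 else 1, (PySem.Str.len n : Int), counts.getD n 0]

def pick_canonical_py (names : List String) : String :=
  if names = [] then ""
  else
    -- counts: defaultdict(int); for n in names: counts[n] += 1
    let counts : PySem.Dict String Int :=
      names.foldl (fun d n => d.modify n 0 (· + 1)) PySem.Dict.empty
    -- candidates = sorted(counts.keys(), key=..., reverse=True)
    let candidates := PySem.List.sorted counts.keys (pyKeyA counts) true
    -- return candidates[0]  (nonempty since names ≠ [])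
    candidates.headD ""

-- ===== PORT B =====
-- Source B's tuple key as a flat triple (bool as 0/1, as Python compares bools).
def keyTripleB (n : String) (c : Int) : Int × Int × Int :=
  (if pyStrIsupper n then 0 else 1, (PySem.Str.len n : Int), c)

-- Source B's 'k > best_key': Python's lexicographic tuple '>' on two triples, by hand.
def keyGtB (a b : Int × Int × Int) : Bool :=
  b.1 < a.1 || (b.1 == a.1 && (b.2.1 < a.2.1 || (b.2.1 == a.2.1 && b.2.2 < a.2.2)))

def pick_canonical_py_alt (names : List String) : String :=
  if names = [] then ""
  else
    -- counts = Counter(names)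
    let counts : PySem.Dict String Int := PySem.Dict.counter names
    -- best = ""; best_key = None
    -- for n, c in counts.items():
    --     k = (not n.isupper(), len(n), c)
    --     if best_key is None or k > best_key: best, best_key = n, k
    -- return best
    (counts.items.foldl
      (fun (st : String × Option (Int × Int × Int)) nc =>
        let k := keyTripleB nc.1 nc.2
        match st.2 with
        | none => (nc.1, some k)
        | some bk => if keyGtB k bk then (nc.1, some k) else st)
      ("", none)).1

-- ===== PRECONDITION & SPEC =====
def Spec_pick_canonical_py (names : List String) (out : String) : Prop := out = pick_canonical_py_alt names
instance (names : List String) (out : String) : Decidable (Spec_pick_canonical_py names out) := by unfold Spec_pick_canonical_py; infer_instance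

-- ===== CLAIM (what is proved, stated in full; the proofs are below) =====
def Claim_equal_pick_canonical_py : Prop := ∀ (names : List String), Dom_pick_canonical_py names → Spec_pick_canonical_py names (pick_canonical_py names)

-- ===== LEMMAS AND PROOFS =====

-- The running-maximum step: what both a reverse insertion sort's head and a
-- running-best loop do with one more element.
def stepMax {α κ : Type} [LT κ] [DecidableLT κ] (key : α → κ) : Option α → α → Option α
  | none, x => some x
  | some m, x => if key m < key x then some x else some m

-- The head of the stable reverse insertion sort evolves exactly like the running
-- maximum: inserting x in front position iff the current head's key is < key x.
lemma head?_insertBy_rev {α κ : Type} [LT κ] [DecidableLT κ] (key : α → κ) (x : α) (acc : List α) :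
    (PySem.List.insertBy (fun a b => decide (key b < key a)) x acc).head? =
      stepMax key acc.head? x := by
  cases acc with
  | nil => simp [PySem.List.insertBy, stepMax]
  | cons y ys =>
      simp only [PySem.List.insertBy, List.head?_cons, stepMax]
      by_cases h : key y < key x <;> simp [h]

lemma foldl_insertBy_head? {α κ : Type} [LT κ] [DecidableLT κ] (key : α → κ) (xs : List α) (acc : List α) :
    (xs.foldl (fun acc x => PySem.List.insertBy (fun a b => decide (key b < key a)) x acc) acc).head? =
      xs.foldl (stepMax key) acc.head? := by
  induction xs generalizing acc with
  | nil => rfl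
  | cons x t ih =>
      simp only [List.foldl_cons]
      rw [ih, head?_insertBy_rev]

-- '<' on length-3 Int lists is exactly the hand-written triple comparison of port B.
lemma keyGtB_eq_list_lt (a b : Int × Int × Int) :
    keyGtB a b = decide (([b.1, b.2.1, b.2.2] : List Int) < [a.1, a.2.1, a.2.2]) := by
  obtain ⟨a1, a2, a3⟩ := a
  obtain ⟨b1, b2, b3⟩ := b
  simp only [keyGtB, List.cons_lt_cons_iff, List.not_lt_nil]
  by_cases h1 : b1 < a1 <;> by_cases h2 : (b1 : Int) = a1 <;>
    by_cases h3 : b2 < a2 <;> by_cases h4 : (b2 : Int) = a2 <;>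
      simp [h1, h2, h3, h4]

-- B's triple key at an item of Counter(names) matches A's list key on that name.
lemma keyTripleB_pyKeyA (names : List String) (n : String) :
    pyKeyA (PySem.Dict.counter names) n =
      [(keyTripleB n (names.count n : Int)).1,
       (keyTripleB n (names.count n : Int)).2.1,
       (keyTripleB n (names.count n : Int)).2.2] := by
  simp [pyKeyA, keyTripleB, PySem.Dict.getD_counter]

-- The state of B's loop as a function of the running maximum: "" with no key yet,
-- or the current best name with its key.
def encodeB (names : List String) : Option String → String × Option (Int × Int × Int)
  | none => ("", none)
  | some n => (n, some (keyTripleB n (names.count n : Int)))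

lemma encodeB_fst (names : List String) (o : Option String) :
    (encodeB names o).1 = o.getD "" := by cases o <;> rfl

-- B's running-best fold over the items of Counter(names) computes the same name as
-- the running-maximum fold (under A's key) over the corresponding keys.
lemma foldB_eq_foldA (names : List String) (ks : List String) (m : Option String) :
    ((ks.map (fun k => (k, (names.count k : Int)))).foldl
        (fun (st : String × Option (Int × Int × Int)) nc =>
          let k := keyTripleB nc.1 nc.2
          match st.2 with
          | none => (nc.1, some k)
          | some bk => if keyGtB k bk then (nc.1, some k) else st)
        (encodeB names m)) =
      (encodeB names (ks.foldl (stepMax (pyKeyA (PySem.Dict.counter names))) m)) := by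
  induction ks generalizing m with
  | nil => rfl
  | cons k t ih =>
      simp only [List.map_cons, List.foldl_cons]
      cases m with
      | none => simpa [encodeB, keyTripleB, stepMax] using ih (some k)
      | some n =>
          have hb : keyGtB (keyTripleB k (names.count k : Int)) (keyTripleB n (names.count n : Int)) =
              decide (pyKeyA (PySem.Dict.counter names) n < pyKeyA (PySem.Dict.counter names) k) := by
            rw [keyGtB_eq_list_lt, keyTripleB_pyKeyA, keyTripleB_pyKeyA]
          by_cases h : pyKeyA (PySem.Dict.counter names) n < pyKeyA (PySem.Dict.counter names) k
          · simpa [encodeB, hb, h, stepMax] using ih (some k)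
          · simpa [encodeB, hb, h, stepMax] using ih (some n)

-- ===== VERDICT (by name: the statement is the Claim_ definition above) =====
theorem pick_canonical_py_spec : Claim_equal_pick_canonical_py := by
  intro names _
  unfold Spec_pick_canonical_py pick_canonical_py pick_canonical_py_alt
  by_cases h : names = []
  · simp [h]
  · simp only [h, ite_false]
    have hc : names.foldl (fun d n => d.modify n 0 (· + 1)) PySem.Dict.empty =
        PySem.Dict.counter names := rfl
    rw [hc, PySem.Dict.items_counter, ← PySem.Dict.keys_counter,
      List.headD_eq_head?_getD, PySem.List.sorted_rev_eq_foldl_insertBy,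
      foldl_insertBy_head?]
    simp only [List.head?_nil]
    have := foldB_eq_foldA names (PySem.Dict.counter names).keys none
    simp only [PySem.Dict.keys_counter] at this ⊢
    rw [show (("", none) : String × Option (Int × Int × Int)) = encodeB names none from rfl, this]
    rw [encodeB_fst]
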